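-- pv_equiv track=rewrite | github.com/pyk/hourlybot | source.py | is_keywords_exists
-- ===== SOURCE A (Python) =====
-- from typing import List, Optional
--
-- def get_bigram(unigrams: List[str]) -> List[str]:
--     unigram_size = len(unigrams)
--     current_i = 0
--     next_i = current_i + 1
--     bigrams = []
--     while next_i < unigram_size:
--         bigram = "{} {}".format(unigrams[current_i], unigrams[next_i])
--         current_i += 1
--         next_i = current_i + 1
--         bigrams.append(bigram)
--     return bigrams
--
-- def is_keywords_exists(text: str, keywords: List[str]) -> bool:
--     # If keywords is empty, returns True for all story
--     if len(keywords) == 0: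
--         return True
--
--     unigrams = text.strip().split()
--     bigrams = get_bigram(unigrams)
--     unigrams_set = set(unigrams)
--     bigrams_set = set(bigrams)
--     for keyword in keywords:
--         # Check the keyword
--         if keyword in unigrams_set or keyword in bigrams_set:
--             return True
--     return False
-- ===== SOURCE B (Python) =====
-- def is_keywords_exists(text, keywords):
--     # If keywords is empty, returns True for all story
--     if len(keywords) == 0:
--         return True
--     unigrams = text.strip().split()
--     grams = unigrams + ["{} {}".format(a, b) for a, b in zip(unigrams, unigrams[1:])]
--     xs = sorted(grams)
--     ys = sorted(keywords)
--     i = 0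
--     j = 0
--     while i < len(xs) and j < len(ys):
--         if xs[i] == ys[j]:
--             return True
--         elif xs[i] < ys[j]:
--             i += 1
--         else:
--             j += 1
--     return False
-- ===== Notes on version B (the rewrite author's own statement) =====
-- stated objective: alternative
-- what changed: Replaces hash-set membership entirely: B sorts the text's n-grams and the keywords and runs a two-pointer merge intersection over the two sorted lists, returning True at the first common element.
import Mathlib
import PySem

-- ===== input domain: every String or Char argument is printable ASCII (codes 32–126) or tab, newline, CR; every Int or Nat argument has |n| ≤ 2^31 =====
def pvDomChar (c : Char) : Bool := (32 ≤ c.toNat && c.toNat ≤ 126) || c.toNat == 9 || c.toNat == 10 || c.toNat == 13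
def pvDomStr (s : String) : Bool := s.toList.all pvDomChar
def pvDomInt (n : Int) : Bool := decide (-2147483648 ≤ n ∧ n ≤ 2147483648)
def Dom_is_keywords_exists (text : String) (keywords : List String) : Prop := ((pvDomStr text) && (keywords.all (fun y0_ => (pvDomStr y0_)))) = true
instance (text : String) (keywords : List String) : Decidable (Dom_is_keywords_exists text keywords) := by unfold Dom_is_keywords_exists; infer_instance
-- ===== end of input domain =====

-- B drops the hash sets altogether: it sorts n-grams and keywords and intersects them by a two-pointer merge (alternative algorithm, no speed claim).
-- ===== PORT A =====
-- while-loop of get_bigram: current_i walks forward while current_i+1 < len(unigrams)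
def get_bigram_loop (unigrams : List String) (current_i : Nat) (bigrams : List String) : List String :=
  if current_i + 1 < unigrams.length then
    get_bigram_loop unigrams (current_i + 1)
      (bigrams ++ [unigrams.getD current_i "" ++ " " ++ unigrams.getD (current_i + 1) ""])
  else bigrams
termination_by unigrams.length - current_i

def get_bigram (unigrams : List String) : List String :=
  get_bigram_loop unigrams 0 []

def is_keywords_exists (text : String) (keywords : List String) : Bool :=
  if keywords.length == 0 then true
  else
    let unigrams := PySem.Str.split₀ (PySem.Str.strip text)
    let bigrams := get_bigram unigrams
    let unigrams_set := PySem.Set.ofList unigrams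
    let bigrams_set := PySem.Set.ofList bigrams
    -- for keyword in keywords: early return True = List.any
    keywords.any (fun keyword => unigrams_set.contains keyword || bigrams_set.contains keyword)

-- ===== PORT B =====
-- the while loop of Source B: two pointers over the two sorted lists
def merge_loop (xs ys : List String) (i j : Nat) : Bool :=
  if h : i < xs.length ∧ j < ys.length then
    if xs[i]'h.1 = ys[j]'h.2 then true
    else if xs[i]'h.1 < ys[j]'h.2 then merge_loop xs ys (i + 1) j
    else merge_loop xs ys i (j + 1)
  else false
termination_by (xs.length - i) + (ys.length - j)

def is_keywords_exists_alt (text : String) (keywords : List String) : Bool :=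
  if keywords.length == 0 then true
  else
    let unigrams := PySem.Str.split₀ (PySem.Str.strip text)
    let grams := unigrams ++ (unigrams.zip (unigrams.drop 1)).map (fun p => p.1 ++ " " ++ p.2)
    let xs := PySem.List.sorted grams (fun x => x) false
    let ys := PySem.List.sorted keywords (fun x => x) false
    merge_loop xs ys 0 0

-- ===== PRECONDITION & SPEC =====
def Spec_is_keywords_exists (text : String) (keywords : List String) (out : Bool) : Prop := out = is_keywords_exists_alt text keywords
instance (text : String) (keywords : List String) (out : Bool) : Decidable (Spec_is_keywords_exists text keywords out) := by unfold Spec_is_keywords_exists; infer_instance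

-- ===== CLAIM (what is proved, stated in full; the proofs are below) =====
def Claim_equal_is_keywords_exists : Prop := ∀ (text : String) (keywords : List String), Dom_is_keywords_exists text keywords → Spec_is_keywords_exists text keywords (is_keywords_exists text keywords)

-- ===== LEMMAS AND PROOFS =====
theorem contains_ofList_iff (xs : List String) (x : String) :
    (PySem.Set.ofList xs).contains x = true ↔ x ∈ xs := by
  simp [pysem]

-- The loop of get_bigram, started at i, produces the bigrams of the suffix from i.
theorem get_bigram_loop_eq (us : List String) (i : Nat) (acc : List String) :
    get_bigram_loop us i acc
      = acc ++ ((us.drop i).zip (us.drop (i + 1))).map (fun p => p.1 ++ " " ++ p.2) := by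
  by_cases h : i + 1 < us.length
  · rw [get_bigram_loop, if_pos h, get_bigram_loop_eq us (i + 1)]
    have e : i + 1 + 1 = i + 2 := by omega
    have hd1 : us.drop i = us[i] :: us.drop (i + 1) :=
      List.drop_eq_getElem_cons (by omega)
    have hd2 : us.drop (i + 1) = us[i + 1] :: us.drop (i + 2) :=
      List.drop_eq_getElem_cons h
    rw [e, hd1, hd2, List.zip_cons_cons, List.map_cons]
    simp [List.getD_eq_getElem?_getD, List.getElem?_eq_getElem h,
      List.getElem?_eq_getElem (show i < us.length by omega)]
  · have hnil : us.drop (i + 1) = [] := List.drop_eq_nil_of_le (by omega)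
    rw [get_bigram_loop, if_neg h, hnil]
    simp
termination_by us.length - i

theorem get_bigram_eq (us : List String) :
    get_bigram us = (us.zip (us.drop 1)).map (fun p => p.1 ++ " " ++ p.2) := by
  rw [get_bigram, get_bigram_loop_eq]; simp

-- The two-pointer merge over two (≤)-sorted lists finds a common element of the suffixes iff one exists.
theorem merge_loop_iff (xs ys : List String)
    (hx : xs.Pairwise (· ≤ ·)) (hy : ys.Pairwise (· ≤ ·)) (i j : Nat) :
    merge_loop xs ys i j = true ↔ ∃ x, x ∈ xs.drop i ∧ x ∈ ys.drop j := by
  by_cases h : i < xs.length ∧ j < ys.length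
  · have hdx : xs.drop i = xs[i] :: xs.drop (i + 1) := List.drop_eq_getElem_cons h.1
    have hdy : ys.drop j = ys[j] :: ys.drop (j + 1) := List.drop_eq_getElem_cons h.2
    rw [merge_loop, dif_pos h]
    by_cases heq : xs[i]'h.1 = ys[j]'h.2
    · simp only [if_pos heq, true_iff]
      exact ⟨xs[i], by rw [hdx]; exact List.mem_cons_self, by rw [hdy, heq]; exact List.mem_cons_self⟩
    · rw [if_neg heq]
      by_cases hlt : xs[i]'h.1 < ys[j]'h.2
      · -- xs[i] < ys[j]: xs[i] cannot occur in ys.drop j, so skip it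
        rw [if_pos hlt, merge_loop_iff xs ys hx hy (i + 1) j, hdx]
        constructor
        · rintro ⟨x, hx1, hx2⟩; exact ⟨x, List.mem_cons_of_mem _ hx1, hx2⟩
        · rintro ⟨x, hx1, hx2⟩
          rcases List.mem_cons.mp hx1 with rfl | hx1'
          · exfalso
            have hyd : (ys.drop j).Pairwise (· ≤ ·) := hy.drop
            rw [hdy] at hx2 hyd
            rcases List.mem_cons.mp hx2 with he | hmem
            · exact absurd (he ▸ hlt) (lt_irrefl _)
            · have := (List.pairwise_cons.mp hyd).1 _ hmem
              exact absurd (lt_of_lt_of_le hlt this) (lt_irrefl _)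
          · exact ⟨x, hx1', hx2⟩
      · -- ys[j] < xs[i]: ys[j] cannot occur in xs.drop i, so skip it
        rw [if_neg hlt, merge_loop_iff xs ys hx hy i (j + 1), hdy]
        have hgt : ys[j]'h.2 < xs[i]'h.1 :=
          lt_of_le_of_ne (not_lt.mp hlt) (fun he => heq he.symm)
        constructor
        · rintro ⟨x, hx1, hx2⟩; exact ⟨x, hx1, List.mem_cons_of_mem _ hx2⟩
        · rintro ⟨x, hx1, hx2⟩
          rcases List.mem_cons.mp hx2 with rfl | hx2'
          · exfalso
            have hxd : (xs.drop i).Pairwise (· ≤ ·) := hx.drop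
            rw [hdx] at hx1 hxd
            rcases List.mem_cons.mp hx1 with he | hmem
            · exact absurd (he ▸ hgt) (lt_irrefl _)
            · have := (List.pairwise_cons.mp hxd).1 _ hmem
              exact absurd (lt_of_lt_of_le hgt this) (lt_irrefl _)
          · exact ⟨x, hx1, hx2'⟩
  · rw [merge_loop, dif_neg h]
    rcases not_and_or.mp h with h1 | h1
    · simp [List.drop_eq_nil_of_le (show xs.length ≤ i by omega)]
    · simp [List.drop_eq_nil_of_le (show ys.length ≤ j by omega)]
termination_by (xs.length - i) + (ys.length - j)

-- ===== VERDICT (by name: the statement is the Claim_ definition above) =====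
theorem is_keywords_exists_spec : Claim_equal_is_keywords_exists := by
  intro text keywords _
  unfold Spec_is_keywords_exists
  simp only [is_keywords_exists, is_keywords_exists_alt]
  by_cases hk : keywords.length = 0
  · simp [hk]
  · simp only [show (keywords.length == 0) = false by simp [hk], Bool.false_eq_true, if_false]
    set us := PySem.Str.split₀ (PySem.Str.strip text) with hus
    set bg := (us.zip (us.drop 1)).map (fun p => p.1 ++ " " ++ p.2) with hbg
    rw [get_bigram_eq,
      Bool.eq_iff_iff,
      merge_loop_iff _ _ (PySem.List.sorted_pairwise _ _) (PySem.List.sorted_pairwise _ _) 0 0]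
    simp only [List.drop_zero, PySem.List.mem_sorted, List.mem_append,
      List.any_eq_true, Bool.or_eq_true, contains_ofList_iff]
    constructor
    · rintro ⟨k, hk1, hk2⟩; exact ⟨k, hk2, hk1⟩
    · rintro ⟨x, hx1, hx2⟩; exact ⟨x, hx2, hx1⟩
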